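-- pv_equiv track=rewrite | github.com/codePascal/nfl_fantasy | FFDP_course/Clustering/clustering.py | assign_tiers
-- ===== SOURCE A (Python) =====
-- def assign_tiers(labels):
--     """
--     Map the labels to fantasy football tiers.
--
--     :param labels: trained labels
--     :type labels: list of ints
--     :return: tier of player
--     :rtype: list of ints
--     """
--     unique_labels = list()
--     tiers = list()
--
--     # check for each label which tier it is
--     for label in labels:
--         # assign unique label
--         if label not in unique_labels:
--             unique_labels.append(label)
--
--         # players are ranked in descending order
--         tiers.append(len(set(unique_labels)))
--
--     return tiers
-- ===== SOURCE B (Python) =====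
-- def assign_tiers(labels):
--     """Per-prefix recompute: tier at i = number of distinct labels in labels[:i+1]."""
--     return [len(set(labels[:i + 1])) for i in range(len(labels))]
-- ===== Notes on version B (the rewrite author's own statement) =====
-- stated objective: simpler
-- what changed: Replaces the single incremental pass maintaining a unique-labels list with a one-line comprehension that recomputes the distinct count of each prefix from scratch.
import Mathlib
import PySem

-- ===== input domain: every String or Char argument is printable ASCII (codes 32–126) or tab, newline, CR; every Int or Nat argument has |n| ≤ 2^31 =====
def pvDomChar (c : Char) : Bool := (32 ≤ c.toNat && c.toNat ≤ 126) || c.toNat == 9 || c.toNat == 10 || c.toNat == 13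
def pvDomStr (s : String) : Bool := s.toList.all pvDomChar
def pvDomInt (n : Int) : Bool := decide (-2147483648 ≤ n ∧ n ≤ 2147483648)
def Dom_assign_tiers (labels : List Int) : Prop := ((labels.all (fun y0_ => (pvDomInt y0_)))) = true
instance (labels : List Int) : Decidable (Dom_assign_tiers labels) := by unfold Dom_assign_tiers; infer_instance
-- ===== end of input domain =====

-- B replaces A's incremental unique-list pass by a per-prefix recompute (distinct count of each prefix from scratch); objective: simpler.

-- ===== PORT A =====
-- one incremental pass: maintain unique_labels, append len(set(unique_labels)) each step
def assign_tiers (labels : List Int) : List Int :=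
  (labels.foldl
    (fun (st : List Int × List Int) label =>
      let unique_labels := if label ∈ st.1 then st.1 else st.1 ++ [label]
      (unique_labels, st.2 ++ [PySem.Set.len (PySem.Set.ofList unique_labels)]))
    ([], [])).2

-- ===== PORT B =====
-- [len(set(labels[:i+1])) for i in range(len(labels))]
def assign_tiers_alt (labels : List Int) : List Int :=
  (List.range labels.length).map
    (fun (i : Nat) => PySem.Set.len (PySem.Set.ofList (PySem.List.slice labels none (some ((i : Int) + 1)))))

-- ===== PRECONDITION & SPEC =====
def Spec_assign_tiers (labels : List Int) (out : List Int) : Prop := out = assign_tiers_alt labels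
instance (labels : List Int) (out : List Int) : Decidable (Spec_assign_tiers labels out) := by unfold Spec_assign_tiers; infer_instance

-- ===== CLAIM (what is proved, stated in full; the proofs are below) =====
def Claim_equal_assign_tiers : Prop := ∀ (labels : List Int), Dom_assign_tiers labels → Spec_assign_tiers labels (assign_tiers labels)

-- ===== LEMMAS AND PROOFS =====

-- A's loop, run from an arbitrary deduplicated prefix p (unique list = set(p)) and output t,
-- appends exactly the distinct-prefix counts.
lemma assign_tiers_loop (labels : List Int) (p t : List Int) :
    (labels.foldl
      (fun (st : List Int × List Int) label =>
        let unique_labels := if label ∈ st.1 then st.1 else st.1 ++ [label]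
        (unique_labels, st.2 ++ [PySem.Set.len (PySem.Set.ofList unique_labels)]))
      (PySem.Set.ofList p, t)).2
    = t ++ (List.range labels.length).map
        (fun i => PySem.Set.len (PySem.Set.ofList (p ++ labels.take (i + 1)))) := by
  induction labels generalizing p t with
  | nil => simp
  | cons a rest ih =>
    have hu : (if a ∈ PySem.Set.ofList p then PySem.Set.ofList p else PySem.Set.ofList p ++ [a])
        = PySem.Set.ofList (p ++ [a]) := by
      rw [PySem.Set.ofList_append_singleton, PySem.Set.add_eq_ite]
    simp only [List.foldl_cons, hu]
    rw [ih (p ++ [a]) (t ++ [PySem.Set.len (PySem.Set.ofList (PySem.Set.ofList (p ++ [a])))]),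
        PySem.Set.ofList_ofList, List.length_cons, List.range_succ_eq_map]
    simp [List.map_map, Function.comp, List.append_assoc]

-- ===== VERDICT (by name: the statement is the Claim_ definition above) =====
theorem assign_tiers_spec : Claim_equal_assign_tiers := by
  intro labels _
  unfold Spec_assign_tiers assign_tiers assign_tiers_alt
  rw [show (([], []) : List Int × List Int) = (PySem.Set.ofList ([] : List Int), ([] : List Int)) from rfl,
      assign_tiers_loop labels [] []]
  simp only [List.nil_append]
  refine List.map_congr_left ?_
  intro i _
  rw [show ((i : Int) + 1) = ((i + 1 : Nat) : Int) by push_cast; ring,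
      PySem.List.slice_to_natCast]
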